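-- pv_equiv track=rewrite | github.com/hat27/puzzle2 | src/puzzle2/plugins/deadline/plugins/puzzle2/puzzle2.py | _split_command
-- ===== SOURCE A (Python) =====
-- def _split_command(command):
--     """Naive split of a quoted command string into (exe, args).
--     Assumes Windows-style quoting for the first token.
--     """
--     cmd = command.strip()
--     exe = cmd
--     args = ""
--     if not cmd:
--         return "", ""
--     if cmd[0] == '"':
--         # find closing quote
--         idx = cmd.find('"', 1)
--         while idx != -1 and idx + 1 < len(cmd) and cmd[idx + 1] != ' ':
--             idx = cmd.find('"', idx + 1)
--         if idx != -1:
--             exe = cmd[1:idx]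
--             args = cmd[idx + 1:].lstrip()
--         else:
--             exe = cmd.strip('"')
--             args = ""
--     else:
--         parts = cmd.split(" ", 1)
--         exe = parts[0]
--         args = parts[1] if len(parts) > 1 else ""
--     return exe, args
-- ===== SOURCE B (Python) =====
-- def _split_command(command):
--     """Split a quoted command string into (exe, args).
--
--     Quoted branch: one left-to-right character scan accumulating the exe,
--     instead of repeated str.find calls.
--     """
--     cmd = command.strip()
--     if not cmd:
--         return "", ""
--     if cmd[0] != '"':
--         parts = cmd.split(" ", 1)
--         return parts[0], parts[1] if len(parts) > 1 else ""
--     exe_chars = []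
--     rest = cmd[1:]
--     while rest:
--         c, rest = rest[0], rest[1:]
--         if c == '"' and (not rest or rest[0] == " "):
--             return "".join(exe_chars), rest.lstrip()
--         exe_chars.append(c)
--     return cmd.strip('"'), ""
-- ===== Notes on version B (the rewrite author's own statement) =====
-- stated objective: simpler
-- what changed: The quoted branch's repeated str.find calls with a manual index/while scan are replaced by a single left-to-right character scan that accumulates the exe and stops at the first quote followed by a space or end-of-string.
import Mathlib
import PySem

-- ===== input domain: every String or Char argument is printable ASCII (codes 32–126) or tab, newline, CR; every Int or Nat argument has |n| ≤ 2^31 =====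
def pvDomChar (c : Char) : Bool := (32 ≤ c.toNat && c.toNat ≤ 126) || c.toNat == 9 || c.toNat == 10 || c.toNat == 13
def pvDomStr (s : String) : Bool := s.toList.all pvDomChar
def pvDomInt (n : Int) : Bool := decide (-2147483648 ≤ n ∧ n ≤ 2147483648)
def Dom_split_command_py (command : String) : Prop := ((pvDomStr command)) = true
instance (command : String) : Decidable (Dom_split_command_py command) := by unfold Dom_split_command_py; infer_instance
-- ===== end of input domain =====

-- B replaces A's repeated str.find closing-quote loop by a single character scan; objective: simpler.
-- Strings are handled as code-point lists via PySem (exact on the domain).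

-- ===== PORT A =====
-- the 'while idx != -1 and idx + 1 < len(cmd) and cmd[idx + 1] != ' '' loop of A;
-- fuel ≥ number of iterations (idx strictly increases, so cmd.length + 1 is enough)
def pvFindCloseA (cs : List Char) : Nat → Int → Int
  | 0, idx => idx
  | fuel + 1, idx =>
    if idx ≠ -1 ∧ idx + 1 < (cs.length : Int) ∧ PySem.List.pyGet? cs (idx + 1) ≠ some ' ' then
      pvFindCloseA cs fuel (PySem.Chars.findFrom cs ['"'] (idx + 1) none)
    else idx

def split_command_py (command : String) : String × String :=
  let cmd := (PySem.Str.strip command).toList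
  if cmd = [] then ("", "")
  else if PySem.List.pyGet? cmd 0 = some '"' then
    -- idx = cmd.find('"', 1); while …: idx = cmd.find('"', idx + 1)
    let idx := pvFindCloseA cmd (cmd.length + 1) (PySem.Chars.findFrom cmd ['"'] 1 none)
    if idx ≠ -1 then
      (String.ofList (PySem.List.slice cmd (some 1) (some idx)),
       String.ofList (PySem.Chars.lstrip (PySem.List.slice cmd (some (idx + 1)) none)))
    else
      (String.ofList (PySem.Chars.stripChars cmd ['"']), "")
  else
    let parts := PySem.Chars.splitOnMax cmd [' '] 1
    (String.ofList (parts.headD []), String.ofList (if parts.length > 1 then parts.getD 1 [] else []))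

-- ===== PORT B =====
-- B's while loop: scan rest char by char, exe_chars kept as a reversed accumulator
def pvScanB (exeChars : List Char) : List Char → Option (String × String)
  | [] => none
  | c :: rest =>
    if c = '"' ∧ (rest = [] ∨ PySem.List.pyGet? rest 0 = some ' ') then
      some (String.ofList exeChars.reverse, String.ofList (PySem.Chars.lstrip rest))
    else pvScanB (c :: exeChars) rest

def split_command_py_alt (command : String) : String × String :=
  let cmd := (PySem.Str.strip command).toList
  if cmd = [] then ("", "")
  else if ¬ PySem.List.pyGet? cmd 0 = some '"' then
    let parts := PySem.Chars.splitOnMax cmd [' '] 1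
    (String.ofList (parts.headD []), String.ofList (if parts.length > 1 then parts.getD 1 [] else []))
  else
    match pvScanB [] (PySem.List.slice cmd (some 1) none) with
    | some r => r
    | none => (String.ofList (PySem.Chars.stripChars cmd ['"']), "")

-- ===== PRECONDITION & SPEC =====
def Spec_split_command_py (command : String) (out : String × String) : Prop := out = split_command_py_alt command
instance (command : String) (out : String × String) : Decidable (Spec_split_command_py command out) := by unfold Spec_split_command_py; infer_instance

-- ===== CLAIM (what is proved, stated in full; the proofs are below) =====
def Claim_equal_split_command_py : Prop := ∀ (command : String), Dom_split_command_py command → Spec_split_command_py command (split_command_py command)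

-- ===== LEMMAS AND PROOFS =====

theorem pv_scan_none (acc l : List Char) (h : '"' ∉ l) : pvScanB acc l = none := by
  induction l generalizing acc with
  | nil => rfl
  | cons c rest ih =>
    have hc : ¬(c = '"' ∧ (rest = [] ∨ PySem.List.pyGet? rest 0 = some ' ')) := by
      intro hx; exact h (by simp [hx.1])
    simp only [pvScanB, if_neg hc]
    exact ih _ (fun hm => h (List.mem_cons_of_mem _ hm))

theorem pv_scan_skip (w l acc : List Char) (hw : '"' ∉ w) :
    pvScanB acc (w ++ l) = pvScanB (w.reverse ++ acc) l := by
  induction w generalizing acc with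
  | nil => simp
  | cons c w' ih =>
    have hc : ¬(c = '"' ∧ (w' ++ l = [] ∨ PySem.List.pyGet? (w' ++ l) 0 = some ' ')) := by
      intro hx; exact hw (by simp [hx.1])
    simp only [List.cons_append, pvScanB, if_neg hc, List.reverse_cons]
    rw [ih _ (fun hm => hw (List.mem_cons_of_mem _ hm))]; simp

theorem pv_find_first_quote (w v : List Char) (hw : '"' ∉ w) :
    PySem.Chars.find (w ++ '"' :: v) ['"'] = (w.length : Int) := by
  set d := w ++ '"' :: v with hd
  have hocc : ['"'] <+: d.drop w.length := by
    rw [hd, List.drop_left]; exact ⟨v, rfl⟩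
  have hinf : ['"'] <:+: d := by
    rw [List.singleton_infix_iff, hd]; simp
  have h0 : 0 ≤ PySem.Chars.find d ['"'] := (PySem.Chars.find_nonneg_iff _ _).2 hinf
  obtain ⟨hpre, hmin⟩ := PySem.Chars.find_spec h0
  have hle : (PySem.Chars.find d ['"']).toNat ≤ w.length := by
    by_contra hlt
    exact hmin w.length (by omega) hocc
  have hge : ¬ (PySem.Chars.find d ['"']).toNat < w.length := by
    intro hlt
    have hh : d[(PySem.Chars.find d ['"']).toNat]? = some '"' := by
      rw [← List.head?_drop]
      obtain ⟨t, ht⟩ := hpre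
      rw [← ht]; rfl
    rw [hd, List.getElem?_append_left (by omega)] at hh
    exact hw (List.mem_of_getElem? hh)
  omega

-- first-occurrence decomposition
theorem pv_quote_decomp (d : List Char) (h : '"' ∈ d) :
    ∃ w v, d = w ++ '"' :: v ∧ '"' ∉ w := by
  induction d with
  | nil => cases h
  | cons c rest ih =>
    by_cases hc : c = '"'
    · exact ⟨[], rest, by simp [hc], by simp⟩
    · have h2 : '"' ∈ rest := by
        rcases List.mem_cons.1 h with h1 | h1
        · exact absurd h1.symm hc
        · exact h1
      rcases ih h2 with ⟨w, v, hd, hw⟩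
      refine ⟨c :: w, v, by simp [hd], ?_⟩
      simp only [List.mem_cons, not_or]
      exact ⟨fun h' => hc h'.symm, hw⟩

theorem pv_bridge (u : List Char) (j fuel : Nat) (hj : j ≤ u.length)
    (hfuel : u.length + 1 - j ≤ fuel) :
    (let cs := '"' :: u
     let idx := pvFindCloseA cs fuel (PySem.Chars.findFrom cs ['"'] ((j : Int) + 1) none)
     if idx ≠ -1 then
       (String.ofList (PySem.List.slice cs (some 1) (some idx)),
        String.ofList (PySem.Chars.lstrip (PySem.List.slice cs (some (idx + 1)) none)))
     else
       (String.ofList (PySem.Chars.stripChars cs ['"']), "")) =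
    (match pvScanB ((u.take j).reverse) (u.drop j) with
     | some r => r
     | none => (String.ofList (PySem.Chars.stripChars ('"' :: u) ['"']), "")) := by
  induction fuel generalizing j with
  | zero => omega
  | succ fuel ih =>
    simp only []
    have hdrop : List.drop (j + 1) ('"' :: u) = u.drop j := rfl
    have hcast : ((j : Int) + 1) = ((j + 1 : Nat) : Int) := by push_cast; ring
    have hff := PySem.Chars.findFrom_natCast ('"' :: u) ['"'] (j + 1) (by simp; omega)
    rw [hdrop] at hff
    by_cases hqd : '"' ∈ u.drop j
    · rcases pv_quote_decomp _ hqd with ⟨w, v, hd, hw⟩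
      have hfind : PySem.Chars.find (u.drop j) ['"'] = (w.length : Int) := by
        rw [hd]; exact pv_find_first_quote w v hw
      have hlen : u.length = j + w.length + 1 + v.length := by
        have := List.length_drop (i := j) (l := u)
        rw [hd] at this; simp at this; omega
      have hidx : PySem.Chars.findFrom ('"' :: u) ['"'] ((j : Int) + 1) none
          = ((j + w.length + 1 : Nat) : Int) := by
        rw [hcast, hff, hfind]
        have : (w.length : Int) ≠ -1 := by omega
        simp only [if_neg (by omega : ¬ (w.length : Int) = -1)]
        push_cast; ring
      set p : Nat := j + w.length with hp
      have hvdrop : u.drop (p + 1) = v := by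
        have : u.drop (p + 1) = (u.drop j).drop (w.length + 1) := by
          rw [List.drop_drop, show j + (w.length + 1) = p + 1 by omega]
        rw [this, hd]
        rw [show w ++ '"' :: v = (w ++ ['"']) ++ v by simp]
        rw [show w.length + 1 = (w ++ ['"']).length by simp]
        exact List.drop_left
      have hnext : PySem.List.pyGet? ('"' :: u) (((p + 1 : Nat) : Int) + 1) = v[0]? := by
        rw [show (((p + 1 : Nat) : Int) + 1) = ((p + 2 : Nat) : Int) by push_cast; ring,
          PySem.List.pyGet?_natCast]
        show u[p+1]? = v[0]?
        rw [← List.head?_drop, hvdrop]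
        cases v <;> simp
      -- take p = take j ++ w
      have htake : u.take p = u.take j ++ w := by
        rw [hp, List.take_add, hd]
        congr 1
        exact List.take_left
      rw [hidx]
      simp only [pvFindCloseA]
      by_cases hstop : v = [] ∨ v[0]? = some ' '
      · have hcond : ¬(((p + 1 : Nat) : Int) ≠ -1 ∧ ((p + 1 : Nat) : Int) + 1 < (('"' :: u).length : Int) ∧ PySem.List.pyGet? ('"' :: u) (((p + 1 : Nat) : Int) + 1) ≠ some ' ') := by
          rcases hstop with h1 | h1
          · intro hx
            have : u.length = p + 1 + v.length := by omega
            simp [h1] at this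
            rcases hx with ⟨-, hlt, -⟩
            simp at hlt
            omega
          · intro hx
            exact hx.2.2 (by rw [hnext, h1])
        rw [if_neg hcond]
        rw [if_pos (by omega : ¬ ((p + 1 : Nat) : Int) = -1)]
        have hv0 : PySem.List.pyGet? v 0 = v[0]? := by
          rw [show (0 : Int) = ((0 : Nat) : Int) by simp, PySem.List.pyGet?_natCast]
        have hs1 : PySem.List.slice ('"' :: u) (some 1) (some ((p + 1 : Nat) : Int)) = u.take p := by
          rw [show (1 : Int) = ((1 : Nat) : Int) by simp, PySem.List.slice_natCast]
          simp
        have hs2 : PySem.List.slice ('"' :: u) (some (((p + 1 : Nat) : Int) + 1)) none = v := by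
          rw [PySem.List.slice_from _ (by positivity)]
          rw [show ((((p + 1 : Nat) : Int) + 1)).toNat = p + 2 by omega]
          show u.drop (p + 1) = v
          exact hvdrop
        rw [hs1, hs2, hd, pv_scan_skip _ _ _ hw]
        simp only [pvScanB]
        rw [if_pos ⟨by trivial, by
          rcases hstop with h1 | h1
          · exact Or.inl h1
          · exact Or.inr (by rw [hv0]; exact h1)⟩]
        simp [htake]
      · replace hstop := not_or.1 hstop
        have hv0 : PySem.List.pyGet? v 0 = v[0]? := by
          rw [show (0 : Int) = ((0 : Nat) : Int) by simp, PySem.List.pyGet?_natCast]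
        have hcond : (((p + 1 : Nat) : Int) ≠ -1 ∧ ((p + 1 : Nat) : Int) + 1 < (('"' :: u).length : Int) ∧ PySem.List.pyGet? ('"' :: u) (((p + 1 : Nat) : Int) + 1) ≠ some ' ') := by
          refine ⟨by omega, ?_, ?_⟩
          · have hv1 : 1 ≤ v.length := by
              cases v with
              | nil => exact absurd rfl hstop.1
              | cons a t => simp
            simp only [List.length_cons]
            push_cast
            omega
          · rw [hnext]; exact hstop.2
        rw [if_pos hcond]
        have hIH := ih (p + 1) (by omega) (by omega)
        simp only [] at hIH
        rw [show (((p + 1 : Nat) : Int) + 1) = (((p + 1 : Nat) : Int) + 1) from rfl] at *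
        rw [hIH]
        have htake1 : u.take (p + 1) = u.take j ++ (w ++ ['"']) := by
          rw [show p + 1 = j + (w.length + 1) by omega, List.take_add, hd]
          congr 1
          rw [show w ++ '"' :: v = (w ++ ['"']) ++ v by simp,
            show w.length + 1 = (w ++ ['"']).length by simp]
          exact List.take_left
        rw [hvdrop, htake1, hd, pv_scan_skip _ _ _ hw]
        simp only [pvScanB]
        rw [if_neg (by
          intro hx
          rcases hx.2 with h1 | h1
          · exact hstop.1 h1
          · exact hstop.2 (by rw [← hv0]; exact h1))]
        congr 1
        simp
    · have hfind : PySem.Chars.find (u.drop j) ['"'] = -1 := by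
        rw [PySem.Chars.find_eq_neg_one_iff, List.singleton_infix_iff]; exact hqd
      have hidx : PySem.Chars.findFrom ('"' :: u) ['"'] ((j : Int) + 1) none = -1 := by
        rw [hcast, hff, hfind]; simp
      rw [hidx]
      have hclose : pvFindCloseA ('"' :: u) (fuel + 1) (-1) = -1 := by
        simp [pvFindCloseA]
      rw [hclose, pv_scan_none _ _ hqd]
      simp

-- ===== VERDICT (by name: the statement is the Claim_ definition above) =====
theorem split_command_py_spec : Claim_equal_split_command_py := by
  intro command _
  show split_command_py command = split_command_py_alt command
  dsimp only [split_command_py, split_command_py_alt]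
  generalize (PySem.Str.strip command).toList = cs
  by_cases h0 : cs = []
  · rw [if_pos h0, if_pos h0]
  · rw [if_neg h0, if_neg h0]
    by_cases hq : PySem.List.pyGet? cs 0 = some '"'
    · rw [if_pos hq, if_neg (not_not_intro hq)]
      obtain ⟨c, u, rfl⟩ : ∃ c u, cs = c :: u := by
        cases cs with
        | nil => exact absurd rfl h0
        | cons c u => exact ⟨c, u, rfl⟩
      have hc : c = '"' := by
        rw [show (0 : Int) = ((0 : Nat) : Int) by simp, PySem.List.pyGet?_natCast] at hq
        simpa using hq
      subst hc
      have hslice : PySem.List.slice ('"' :: u) (some 1) none = u := by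
        rw [PySem.List.slice_from _ (by norm_num)]
        rfl
      rw [hslice]
      have hb := pv_bridge u 0 (('"' :: u).length + 1) (by omega)
        (by simp only [List.length_cons]; omega)
      simp only [Nat.cast_zero, zero_add, List.take_zero, List.reverse_nil, List.drop_zero] at hb
      exact hb
    · rw [if_neg hq, if_pos hq]
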